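-- pv_equiv track=rewrite | github.com/MrBrantCode/unitest_baseline | mut_generate/mist_train_taco/taco_4979/solution.py | count_valid_pairs
-- ===== SOURCE A (Python) =====
-- def count_valid_pairs(test_cases):
--     results = []
--
--     for case in test_cases:
--         N, A = case
--         d = {}
--         for j in A:
--             d[j] = d.get(j, 0) + 1
--
--         A.sort()
--         s = 0
--         c = 0
--
--         for k in range(len(A)):
--             if k == 0:
--                 s = 1
--             elif A[k] != A[k - 1]:
--                 s = 1
--             else:
--                 s += 1
--
--             if d.get(s, 0) >= A[k]:
--                 c += 1
--
--         results.append(c)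
--
--     return results
-- ===== SOURCE B (Python) =====
-- def _count_case(A):
--     freq = {}
--     for x in A:
--         if x in freq:
--             freq[x] += 1
--         else:
--             freq[x] = 1
--     return sum(
--         sum(1 for s in range(1, m + 1) if freq.get(s, 0) >= v)
--         for v, m in freq.items()
--     )
--
--
-- def count_valid_pairs(test_cases):
--     return [_count_case(A) for _, A in test_cases]
-- ===== Notes on version B (the rewrite author's own statement) =====
-- stated objective: alternative
-- what changed: B drops the per-case sort and the run-counter scan entirely: it builds the frequency dictionary once and, for each distinct value v with multiplicity m, counts the run positions s=1..m with freq(s) >= v directly, summing over the dictionary items via comprehensions.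
import Mathlib
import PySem

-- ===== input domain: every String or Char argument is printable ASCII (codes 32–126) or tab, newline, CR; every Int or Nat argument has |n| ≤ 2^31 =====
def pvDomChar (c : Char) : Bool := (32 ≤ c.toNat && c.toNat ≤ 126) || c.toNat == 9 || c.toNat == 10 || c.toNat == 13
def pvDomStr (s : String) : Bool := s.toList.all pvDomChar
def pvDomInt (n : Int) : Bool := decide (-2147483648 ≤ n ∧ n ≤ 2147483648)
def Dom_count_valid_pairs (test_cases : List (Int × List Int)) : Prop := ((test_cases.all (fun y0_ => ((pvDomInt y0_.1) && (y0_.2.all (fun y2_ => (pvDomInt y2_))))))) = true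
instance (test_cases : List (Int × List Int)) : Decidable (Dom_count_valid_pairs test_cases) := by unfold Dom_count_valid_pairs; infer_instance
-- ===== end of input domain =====

-- B drops the sort: per case it reads run positions s = 1..count(v) straight off the
-- frequency dictionary, as a sum of comprehension counts (objective: alternative algorithm,
-- not measurably faster here). Python A sorts each case's list IN PLACE (observable by the
-- caller); B does not mutate: the equivalence proved here is about the RETURN value only.

-- ===== PORT A =====
-- one test case of A: build the counter with get, sort, scan with the run counter s
def pvCaseA (case : Int × List Int) : Int :=
  let A := case.2
  let d := A.foldl (fun d j => d.insert j (d.getD j 0 + 1)) (PySem.Dict.empty : PySem.Dict Int Int)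
  let As := PySem.List.sorted A (fun x => x) false
  let sc := (PySem.List.pyRange 0 (As.length : Int) 1).foldl
    (fun (sc : Int × Int) k =>
      let s := if k = 0 then (1 : Int)
               else if PySem.List.pyGetD As k 0 ≠ PySem.List.pyGetD As (k - 1) 0 then 1
               else sc.1 + 1
      (s, if d.getD s 0 ≥ PySem.List.pyGetD As k 0 then sc.2 + 1 else sc.2))
    (0, 0)
  sc.2

def count_valid_pairs (test_cases : List (Int × List Int)) : List Int :=
  test_cases.foldl (fun results case => results ++ [pvCaseA case]) []

-- ===== PORT B =====
-- _count_case: counter built by membership test, then a sum of comprehension counts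
-- ('sum(1 for s in range(1, m+1) if …)' is a filtered count: filter + length)
def pvCountCase (A : List Int) : Int :=
  let freq := A.foldl
    (fun d x => if d.contains x then d.modify x 0 (· + 1) else d.insert x 1)
    (PySem.Dict.empty : PySem.Dict Int Int)
  (freq.items.map (fun vm =>
    ((((PySem.List.pyRange 1 (vm.2 + 1) 1).filter
        (fun s => freq.getD s 0 ≥ vm.1)).length : Nat) : Int))).sum

def count_valid_pairs_alt (test_cases : List (Int × List Int)) : List Int :=
  test_cases.map (fun case => pvCountCase case.2)

-- ===== PRECONDITION & SPEC =====
def Spec_count_valid_pairs (test_cases : List (Int × List Int)) (out : List Int) : Prop := out = count_valid_pairs_alt test_cases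
instance (test_cases : List (Int × List Int)) (out : List Int) : Decidable (Spec_count_valid_pairs test_cases out) := by unfold Spec_count_valid_pairs; infer_instance

-- ===== CLAIM (what is proved, stated in full; the proofs are below) =====
def Claim_equal_count_valid_pairs : Prop := ∀ (test_cases : List (Int × List Int)), Dom_count_valid_pairs test_cases → Spec_count_valid_pairs test_cases (count_valid_pairs test_cases)

-- ===== LEMMAS AND PROOFS =====

-- B's counter loop (membership test, then bump or insert) is Counter(A)
lemma pvFoldB_eq_counter (A : List Int) :
    A.foldl (fun d x => if d.contains x then d.modify x 0 (· + 1) else d.insert x 1)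
      (PySem.Dict.empty : PySem.Dict Int Int) = PySem.Dict.counter A := by
  have hfun : (fun (d : PySem.Dict Int Int) x =>
        if d.contains x then d.modify x 0 (· + 1) else d.insert x 1)
      = fun d x => d.modify x 0 (· + 1) := by
    funext d x
    by_cases h : d.contains x = true
    · simp [h]
    · simp only [Bool.not_eq_true] at h
      simp [h, PySem.Dict.modify, PySem.Dict.insert, PySem.Dict.getD_of_not_contains d 0 h]
  rw [hfun, PySem.Dict.counter_eq_foldl]

-- the contribution of one dictionary item (v, c): #{s ∈ [1, c] | g s ≥ v}
def pvS (g : Int → Int) (v c : Int) : Int :=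
  ((PySem.List.pyRange 1 (c + 1) 1).map (fun s => if g s ≥ v then (1 : Int) else 0)).sum

-- B's inner comprehension count is pvS
lemma pvS_eq_filter_len (g : Int → Int) (v c : Int) :
    ((((PySem.List.pyRange 1 (c + 1) 1).filter
        (fun s => g s ≥ v)).length : Nat) : Int) = pvS g v c := by
  unfold pvS
  rw [show (fun s => if g s ≥ v then (1 : Int) else 0)
      = (fun s => if (decide (g s ≥ v)) = true then (1 : Int) else 0) by funext s; simp]
  rw [PySem.List.sum_map_ite_one_zero, List.countP_eq_length_filter]

lemma pvS_succ (g : Int → Int) (v c : Int) (hc : 0 ≤ c) :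
    pvS g v (c + 1) = pvS g v c + (if g (c + 1) ≥ v then (1 : Int) else 0) := by
  unfold pvS
  rw [show c + 1 + 1 = (c + 1) + 1 from rfl, PySem.List.pyRange_one_succ_right (by omega)]
  simp

lemma pvS_one (g : Int → Int) (v : Int) : pvS g v 1 = if g 1 ≥ v then 1 else 0 := by
  have h0 : pvS g v 0 = 0 := by
    unfold pvS
    rw [PySem.List.pyRange_one_eq_nil (by norm_num)]
    rfl
  rw [show (1 : Int) = 0 + 1 from rfl, pvS_succ g v 0 le_rfl, h0, zero_add]
  norm_num

-- step function of A's scan over the sorted list L (with the counter lookup abstracted as g)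
def pvStep (g : Int → Int) (L : List Int) (sc : Int × Int) (k : Int) : Int × Int :=
  let s := if k = 0 then (1 : Int)
           else if PySem.List.pyGetD L k 0 ≠ PySem.List.pyGetD L (k - 1) 0 then 1
           else sc.1 + 1
  (s, if g s ≥ PySem.List.pyGetD L k 0 then sc.2 + 1 else sc.2)

lemma pvGetD_append_left (L ys : List Int) (i : Int) (h0 : 0 ≤ i) (h : i < L.length) :
    PySem.List.pyGetD (L ++ ys) i 0 = PySem.List.pyGetD L i 0 := by
  rw [PySem.List.pyGetD_eq_getElem (L ++ ys) 0 h0 (by simp; omega),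
      PySem.List.pyGetD_eq_getElem L 0 h0 (by omega)]
  exact List.getElem_append_left (by omega)

lemma pvGetD_append_last (L : List Int) (x : Int) :
    PySem.List.pyGetD (L ++ [x]) (L.length : Int) 0 = x := by
  rw [PySem.List.pyGetD_eq_getElem (L ++ [x]) 0 (by positivity) (by simp)]
  simp

-- sum over a nodup list when the function changes at exactly one member
lemma pvSum_update (x : Int) (f f' : Int → Int) :
    ∀ (vs : List Int), vs.Nodup → x ∈ vs → (∀ v ∈ vs, v ≠ x → f v = f' v) →
    (vs.map f).sum = (vs.map f').sum + (f x - f' x) := by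
  intro vs
  induction vs with
  | nil => simp
  | cons a t ih =>
    intro hnd hx hne
    rcases List.mem_cons.mp hx with rfl | hxt
    · have : ∀ v ∈ t, f v = f' v := fun v hv =>
        hne v (List.mem_cons_of_mem _ hv) (fun h => (List.nodup_cons.mp hnd).1 (h ▸ hv))
      simp [List.map_congr_left this]; ring
    · have ha : f a = f' a := hne a (List.mem_cons_self) (fun h => (List.nodup_cons.mp hnd).1 (h ▸ hxt))
      have := ih (List.nodup_cons.mp hnd).2 hxt (fun v hv => hne v (List.mem_cons_of_mem _ hv))
      simp [ha, this]; ring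

-- every element of a ≤-sorted list is ≤ its last element
lemma pvLe_getLast (L : List Int) (hL : L.Pairwise (· ≤ ·)) (h : L ≠ []) :
    ∀ a ∈ L, a ≤ L.getLast h := by
  intro a ha
  rw [← List.dropLast_append_getLast h] at ha hL
  rcases List.mem_append.mp ha with h' | h'
  · exact (List.pairwise_append.mp hL).2.2 a h' _ (by simp)
  · simp_all

-- THE MAIN INVARIANT: A's scan of a sorted list L returns
--   s = multiplicity of the last element, c = Σ_{v distinct in L} pvS g v (count v L)
lemma pvRunFold (g : Int → Int) :
    ∀ (L : List Int), L.Pairwise (· ≤ ·) →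
    (PySem.List.pyRange 0 (L.length : Int) 1).foldl (pvStep g L) (0, 0)
      = (((L.count (L.getLast?.getD 0) : Nat) : Int),
         ((PySem.Set.ofList L).map (fun v => pvS g v ((L.count v : Nat) : Int))).sum) := by
  intro L
  induction L using List.reverseRecOn with
  | nil => intro _; simp [PySem.List.pyRange_one_eq_nil]
  | append_singleton L x ih =>
    intro hP
    have hL : L.Pairwise (· ≤ ·) := (List.pairwise_append.mp hP).1
    have hx : ∀ a ∈ L, a ≤ x := fun a ha => (List.pairwise_append.mp hP).2.2 a ha x (by simp)
    have hlen : (((L ++ [x]).length : Nat) : Int) = (L.length : Int) + 1 := by simp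
    rw [hlen, PySem.List.pyRange_one_succ_right (by positivity), List.foldl_append]
    have hcongr : (PySem.List.pyRange 0 (L.length : Int) 1).foldl (pvStep g (L ++ [x])) (0, 0)
        = (PySem.List.pyRange 0 (L.length : Int) 1).foldl (pvStep g L) (0, 0) := by
      apply PySem.List.foldl_congr_mem
      intro acc k hk
      have hk' := (PySem.List.mem_pyRange_one).mp hk
      unfold pvStep
      by_cases h0 : k = 0
      · subst h0
        simp [pvGetD_append_left L [x] 0 le_rfl (by omega)]
      · simp only [if_neg h0]
        rw [pvGetD_append_left L [x] k hk'.1 hk'.2,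
            pvGetD_append_left L [x] (k - 1) (by omega) (by omega)]
    rw [hcongr, ih hL]
    have hgetx : PySem.List.pyGetD (L ++ [x]) (L.length : Int) 0 = x := pvGetD_append_last L x
    have hlq : (L ++ [x]).getLast?.getD 0 = x := by simp
    by_cases hnil : L = []
    · subst hnil
      simp only [List.foldl_cons, List.foldl_nil, pvStep, List.nil_append]
      norm_num
      rw [show PySem.Set.ofList [x] = [x] from PySem.Set.ofList_eq_self_of_nodup [x] (by simp)]
      norm_num [pvS_one, ge_iff_le]
    · have hpos : 0 < L.length := List.length_pos_iff.mpr hnil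
      have hne0 : ((L.length : Nat) : Int) ≠ 0 := by omega
      have hlast : PySem.List.pyGetD (L ++ [x]) ((L.length : Int) - 1) 0 = L.getLast hnil := by
        rw [pvGetD_append_left L [x] ((L.length : Int) - 1) (by omega) (by omega)]
        rw [PySem.List.pyGetD_eq_getElem L 0 (by omega) (by omega)]
        simp [List.getLast_eq_getElem]
      have hgl : L.getLast?.getD 0 = L.getLast hnil := by
        simp [List.getLast?_eq_some_getLast hnil]
      simp only [List.foldl_cons, List.foldl_nil, pvStep]
      rw [if_neg hne0, hlast, hgetx, hlq, hgl]
      by_cases hxy : x = L.getLast hnil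
      · -- x extends the last run
        have hxL : x ∈ L := hxy ▸ List.getLast_mem hnil
        rw [if_neg (by simp [hxy])]
        rw [← hxy]
        have hofl : PySem.Set.ofList (L ++ [x]) = PySem.Set.ofList L := by
          rw [PySem.Set.ofList_append_singleton, PySem.Set.add_of_mem
            ((PySem.Set.mem_ofList _ _).mpr hxL)]
        have hcx : (L ++ [x]).count x = L.count x + 1 := by simp
        have hcv : ∀ v, v ≠ x → (L ++ [x]).count v = L.count v := by
          intro v hv; simp [List.count_append, Ne.symm hv]
        simp only [Prod.mk.injEq]
        constructor
        · rw [hcx]; push_cast; ring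
        · rw [hofl, pvSum_update x
              (fun v => pvS g v (((L ++ [x]).count v : Nat) : Int))
              (fun v => pvS g v ((L.count v : Nat) : Int))
              (PySem.Set.ofList L) (PySem.Set.nodup_ofList L)
              ((PySem.Set.mem_ofList _ _).mpr hxL)
              (fun v _ hv => by simp only [hcv v hv])]
          simp only [hcx]
          push_cast
          rw [pvS_succ g x (L.count x : Int) (by positivity)]
          split <;> ring
      · -- x starts a new run
        have hxL : x ∉ L := fun hmem =>
          hxy (le_antisymm (pvLe_getLast L hL hnil x hmem) (hx _ (List.getLast_mem hnil)))
        rw [if_pos hxy]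
        have hofl : PySem.Set.ofList (L ++ [x]) = PySem.Set.ofList L ++ [x] := by
          rw [PySem.Set.ofList_append_singleton, PySem.Set.add_of_not_mem (by
            simp [PySem.Set.mem_ofList, hxL])]
        have hcx : (L ++ [x]).count x = 1 := by
          simp [List.count_append, List.count_eq_zero_of_not_mem hxL]
        have hcv : ∀ v ∈ PySem.Set.ofList L, (L ++ [x]).count v = L.count v := by
          intro v hv
          have hvx : v ≠ x := fun h => hxL (h ▸ (PySem.Set.mem_ofList _ _).mp hv)
          simp [List.count_append, Ne.symm hvx]
        simp only [Prod.mk.injEq]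
        constructor
        · rw [hcx]; rfl
        · rw [hofl, List.map_append, List.sum_append]
          have h1 : (PySem.Set.ofList L).map (fun v => pvS g v (((L ++ [x]).count v : Nat) : Int))
              = (PySem.Set.ofList L).map (fun v => pvS g v ((L.count v : Nat) : Int)) :=
            List.map_congr_left (fun v hv => by simp only [hcv v hv])
          rw [h1]
          simp only [List.map_cons, List.map_nil, List.sum_cons, List.sum_nil, hcx,
                     Nat.cast_one, pvS_one]
          split <;> ring

-- per-case equality: A's sorted scan equals B's dictionary comprehension sum
lemma pvCase_eq (case : Int × List Int) : pvCaseA case = pvCountCase case.2 := by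
  rcases case with ⟨N, A⟩
  simp only [pvCaseA, pvCountCase]
  rw [PySem.Dict.foldl_insert_getD_add_one_eq_counter, pvFoldB_eq_counter]
  set g : Int → Int := fun s => (PySem.Dict.counter A).getD s 0 with hg
  set As := PySem.List.sorted A (fun x => x) false with hAs
  -- A side: the scan of the sorted list is the sum over the distinct values
  have hA : (PySem.List.pyRange 0 (As.length : Int) 1).foldl
      (fun (sc : Int × Int) k =>
        let s := if k = 0 then (1 : Int)
                 else if PySem.List.pyGetD As k 0 ≠ PySem.List.pyGetD As (k - 1) 0 then 1
                 else sc.1 + 1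
        (s, if g s ≥ PySem.List.pyGetD As k 0 then sc.2 + 1 else sc.2))
      (0, 0)
      = (PySem.List.pyRange 0 (As.length : Int) 1).foldl (pvStep g As) (0, 0) := rfl
  rw [hA, pvRunFold g As (by simpa using PySem.List.sorted_pairwise A (fun x => x))]
  -- B side: the map over the counter's items is the same sum over the distinct values of A
  rw [PySem.Dict.items_counter, List.map_map]
  have hBfun : ((fun (vm : Int × Int) =>
        ((((PySem.List.pyRange 1 (vm.2 + 1) 1).filter
            (fun s => g s ≥ vm.1)).length : Nat) : Int))
        ∘ fun k => (k, (A.count k : Int)))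
      = fun (k : Int) => pvS g k ((A.count k : Nat) : Int) := by
    funext k
    exact pvS_eq_filter_len g k ((A.count k : Nat) : Int)
  rw [hBfun]
  -- bridge: sorted A is a permutation of A
  have hperm : As.Perm A := PySem.List.sorted_perm A (fun x => x) false
  have hcnt : ∀ v, As.count v = A.count v := fun v => hperm.count_eq v
  have hsetperm : (PySem.Set.ofList As).Perm (PySem.Set.ofList A) :=
    (List.perm_ext_iff_of_nodup (PySem.Set.nodup_ofList As) (PySem.Set.nodup_ofList A)).mpr
      (fun a => by simp only [PySem.Set.mem_ofList]; exact hperm.mem_iff)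
  calc ((PySem.Set.ofList As).map (fun v => pvS g v ((As.count v : Nat) : Int))).sum
      = ((PySem.Set.ofList As).map (fun v => pvS g v ((A.count v : Nat) : Int))).sum := by
        rw [List.map_congr_left (fun v _ => by rw [hcnt v])]
    _ = ((PySem.Set.ofList A).map (fun v => pvS g v ((A.count v : Nat) : Int))).sum :=
        (hsetperm.map _).sum_eq

-- ===== VERDICT (by name: the statement is the Claim_ definition above) =====
theorem count_valid_pairs_spec : Claim_equal_count_valid_pairs := by
  intro tcs _
  unfold Spec_count_valid_pairs count_valid_pairs count_valid_pairs_alt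
  rw [PySem.List.foldl_append_singleton_eq_map]
  exact List.map_congr_left (fun case _ => pvCase_eq case)
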